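-- pv_equiv track=rewrite | github.com/Tal-Even-Zahav/Python_HW2 | ex_ 2 209190321.py | sum_even_digits
-- ===== SOURCE A (Python) =====
-- def sum_even_digits(n):
--     sum = 0
--     while n > 0:
--         digit = n % 10
--         if digit % 2 == 0:
--             sum = sum + digit
--         n = n//10
--     return sum
-- ===== SOURCE B (Python) =====
-- def sum_even_digits(n):
--     if n <= 0:
--         return 0
--     return sum(int(c) for c in str(n) if int(c) % 2 == 0)
-- ===== Notes on version B (the rewrite author's own statement) =====
-- stated objective: idiomatic
-- what changed: Replaces the arithmetic right-to-left digit extraction loop (n % 10, n // 10) with a single left-to-right pass over str(n), summing the even digit characters.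
import Mathlib
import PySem

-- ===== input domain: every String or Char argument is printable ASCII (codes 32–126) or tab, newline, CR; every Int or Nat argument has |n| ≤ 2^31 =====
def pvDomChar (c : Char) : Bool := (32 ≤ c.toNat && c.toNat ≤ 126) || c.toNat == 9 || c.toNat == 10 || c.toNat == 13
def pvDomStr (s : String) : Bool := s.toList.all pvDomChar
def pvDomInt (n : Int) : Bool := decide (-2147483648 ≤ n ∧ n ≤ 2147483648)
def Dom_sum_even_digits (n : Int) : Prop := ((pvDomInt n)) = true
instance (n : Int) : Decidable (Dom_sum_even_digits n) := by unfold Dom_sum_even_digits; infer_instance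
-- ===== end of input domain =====

-- B replaces A's arithmetic right-to-left digit loop by one idiomatic left-to-right pass over str(n); same return value, same cost.

-- ===== PORT A =====
-- the 'while n > 0' loop with accumulator 'sum'; terminates because n // 10 shrinks n.toNat
def sumEvenLoop (n : Int) (sum : Int) : Int :=
  if _h : n > 0 then
    let digit := PySem.Int.mod n 10
    sumEvenLoop (PySem.Int.floordiv n 10)
      (if PySem.Int.mod digit 2 = 0 then sum + digit else sum)
  else sum
termination_by n.toNat
decreasing_by
  have h10 : PySem.Int.floordiv n 10 = n / 10 := PySem.Int.floordiv_eq_ediv_of_pos (by omega)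
  rw [h10]; omega

def sum_even_digits (n : Int) : Int := sumEvenLoop n 0

-- ===== PORT B =====
-- int(c) is PySem.Int.ofChars? [c]; it is always `some` on the digit characters of str(n) (n > 0), so the total .getD 0 form is exact here
def sum_even_digits_alt (n : Int) : Int :=
  if n ≤ 0 then 0
  else (((PySem.Int.toStr n).toList.filter
            (fun c => PySem.Int.mod ((PySem.Int.ofChars? [c]).getD 0) 2 == 0)).map
          (fun c => (PySem.Int.ofChars? [c]).getD 0)).sum

-- ===== PRECONDITION & SPEC =====
def Spec_sum_even_digits (n : Int) (out : Int) : Prop := out = sum_even_digits_alt n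
instance (n : Int) (out : Int) : Decidable (Spec_sum_even_digits n out) := by unfold Spec_sum_even_digits; infer_instance

-- ===== CLAIM (what is proved, stated in full; the proofs are below) =====
def Claim_equal_sum_even_digits : Prop := ∀ (n : Int), Dom_sum_even_digits n → Spec_sum_even_digits n (sum_even_digits n)

-- ===== LEMMAS AND PROOFS =====

-- sum of the even digits of a natural number, digit by digit from the right
def g (m : Nat) : Int :=
  if m = 0 then 0
  else (if (m % 10) % 2 = 0 then ((m % 10 : Nat) : Int) else 0) + g (m / 10)
decreasing_by exact Nat.div_lt_self (by omega) (by omega)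

-- the value B sums over a list of characters
def S (cs : List Char) : Int :=
  ((cs.filter (fun c => PySem.Int.mod ((PySem.Int.ofChars? [c]).getD 0) 2 == 0)).map
      (fun c => (PySem.Int.ofChars? [c]).getD 0)).sum

lemma S_cons (c : Char) (cs : List Char) :
    S (c :: cs) =
      (if PySem.Int.mod ((PySem.Int.ofChars? [c]).getD 0) 2 == 0
        then (PySem.Int.ofChars? [c]).getD 0 else 0) + S cs := by
  simp only [S, List.filter_cons]
  split
  · simp
  · simp_all

lemma ofChars_digitChar (d : Nat) (hd : d < 10) :
    (PySem.Int.ofChars? [Nat.digitChar d]).getD 0 = (d : Int) := by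
  interval_cases d <;> decide

lemma S_digitChar_cons (d : Nat) (hd : d < 10) (cs : List Char) :
    S (Nat.digitChar d :: cs) = (if d % 2 = 0 then (d : Int) else 0) + S cs := by
  rw [S_cons, ofChars_digitChar d hd]
  interval_cases d <;> simp [PySem.Int.mod]

lemma g_eq (m : Nat) (hm : m ≠ 0) :
    g m = (if (m % 10) % 2 = 0 then ((m % 10 : Nat) : Int) else 0) + g (m / 10) := by
  rw [g, if_neg hm]

lemma S_toDigitsCore (fuel : Nat) :
    ∀ (m : Nat) (acc : List Char), m < fuel →
      S (Nat.toDigitsCore 10 fuel m acc) =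
        (if (m % 10) % 2 = 0 then ((m % 10 : Nat) : Int) else 0) + g (m / 10) + S acc := by
  induction fuel with
  | zero => intro m acc h; omega
  | succ f ih =>
    intro m acc h
    rw [Nat.toDigitsCore]
    by_cases h0 : m / 10 = 0
    · rw [if_pos h0, S_digitChar_cons (m % 10) (Nat.mod_lt _ (by omega)), h0]
      rw [g]; simp
    · rw [if_neg h0]
      have hlt : m / 10 < f := by omega
      rw [ih (m / 10) _ hlt, S_digitChar_cons (m % 10) (Nat.mod_lt _ (by omega))]
      rw [g_eq (m / 10) h0]
      ring

lemma S_toDigits (m : Nat) (hm : m ≠ 0) : S (Nat.toDigits 10 m) = g m := by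
  rw [Nat.toDigits, S_toDigitsCore (m + 1) m [] (by omega), g_eq m hm]
  simp [S]

lemma sumEvenLoop_eq (m : Nat) : ∀ s : Int, sumEvenLoop (m : Int) s = s + g m := by
  induction m using Nat.strong_induction_on with
  | _ m ih =>
    intro s
    rw [sumEvenLoop]
    by_cases hm : m = 0
    · subst hm; simp [g]
    · rw [dif_pos (by exact_mod_cast Nat.pos_of_ne_zero hm)]
      have hmod : PySem.Int.mod (m : Int) 10 = ((m % 10 : Nat) : Int) := PySem.Int.mod_natCast m 10
      have hdiv : PySem.Int.floordiv (m : Int) 10 = ((m / 10 : Nat) : Int) := PySem.Int.floordiv_natCast m 10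
      have hmod2 : PySem.Int.mod ((m % 10 : Nat) : Int) 2 = (((m % 10) % 2 : Nat) : Int) := PySem.Int.mod_natCast _ 2
      rw [hmod, hdiv]
      show sumEvenLoop ((m / 10 : Nat) : Int)
          (if PySem.Int.mod ((m % 10 : Nat) : Int) 2 = 0 then s + ((m % 10 : Nat) : Int) else s) = s + g m
      rw [hmod2, ih (m / 10) (Nat.div_lt_self (Nat.pos_of_ne_zero hm) (by omega))]
      rw [g_eq m hm]
      by_cases he : (m % 10) % 2 = 0
      · rw [if_pos (by exact_mod_cast he), if_pos he]; ring
      · rw [if_neg (by exact_mod_cast he), if_neg he]; ring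

lemma loop_nonpos (n : Int) (s : Int) (h : ¬ n > 0) : sumEvenLoop n s = s := by
  rw [sumEvenLoop, dif_neg h]

-- ===== VERDICT (by name: the statement is the Claim_ definition above) =====
theorem sum_even_digits_spec : Claim_equal_sum_even_digits := by
  intro n _
  unfold Spec_sum_even_digits sum_even_digits sum_even_digits_alt
  by_cases hn : n ≤ 0
  · rw [if_pos hn, loop_nonpos n 0 (by omega)]
  · rw [if_neg hn]
    have hpos : 0 < n := by omega
    have htoL : (PySem.Int.toStr n).toList = Nat.toDigits 10 n.toNat := by
      rw [PySem.Int.toList_toStr]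
      simp only [PySem.Int.toChars]
      rw [if_neg (by omega)]
    show sumEvenLoop n 0 = _
    have : sumEvenLoop n 0 = g n.toNat := by
      have := sumEvenLoop_eq n.toNat 0
      rw [Int.toNat_of_nonneg (by omega)] at this
      simpa using this
    rw [htoL]
    show sumEvenLoop n 0 = S (Nat.toDigits 10 n.toNat)
    rw [this, S_toDigits n.toNat (by omega)]
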